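-- pv_equiv track=rewrite | github.com/PPPNut/LSA-DAT | stitch/main.py | fix_strings
-- ===== SOURCE A (Python) =====
-- def fix_strings(inp):
--     res = ""
--     temp_string = ""
--     inside = False
--     for i in range(len(inp)):
--         if not inside:
--             res += inp[i]
--             if inp[i] == '"':
--                 inside = True
--             continue
--         if inside:
--             if inp[i] == '"':
--                 inside = False
--                 if (
--                     len(temp_string) > 2
--                     and temp_string[0] == " "
--                     and temp_string[-1] == " "
--                 ):
--                     res += temp_string[1:-1]
--                 else:
--                     res += temp_string
--                 res += '"'
--                 temp_string = ""
--             else: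
--                 temp_string += inp[i]
--     inp = res
--     res = ""
--     temp_string = ""
--     inside = False
--     for i in range(len(inp)):
--         if not inside:
--             res += inp[i]
--             if inp[i] == "'":
--                 inside = True
--             continue
--         if inside:
--             if inp[i] == "'":
--                 inside = False
--                 if (
--                     len(temp_string) > 2
--                     and temp_string[0] == " "
--                     and temp_string[-1] == " "
--                 ):
--                     res += temp_string[1:-1]
--                 else:
--                     res += temp_string
--                 res += "'"
--                 temp_string = ""
--             else:
--                 temp_string += inp[i]
--     return res
-- ===== SOURCE B (Python) =====
-- def _process(s, q):
--     parts = s.split(q)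
--     res = parts[0]
--     last = len(parts) - 1
--     for i in range(1, len(parts)):
--         res += q
--         p = parts[i]
--         if i % 2 == 1:
--             if i != last:
--                 if len(p) > 2 and p[0] == " " and p[-1] == " ":
--                     res += p[1:-1]
--                 else:
--                     res += p
--             # unterminated quote: opening quote kept, content dropped
--         else:
--             res += p
--     return res
--
-- def fix_strings(inp):
--     return _process(_process(inp, '"'), "'")
-- ===== Notes on version B (the rewrite author's own statement) =====
-- stated objective: alternative
-- what changed: B replaces A's per-character state machine (res/temp_string/inside accumulators) by two split-on-quote passes: split the string on the quote character, strip each closed odd-indexed (inside-quotes) part, drop the content of an unterminated trailing part, and rejoin.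
import Mathlib
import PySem

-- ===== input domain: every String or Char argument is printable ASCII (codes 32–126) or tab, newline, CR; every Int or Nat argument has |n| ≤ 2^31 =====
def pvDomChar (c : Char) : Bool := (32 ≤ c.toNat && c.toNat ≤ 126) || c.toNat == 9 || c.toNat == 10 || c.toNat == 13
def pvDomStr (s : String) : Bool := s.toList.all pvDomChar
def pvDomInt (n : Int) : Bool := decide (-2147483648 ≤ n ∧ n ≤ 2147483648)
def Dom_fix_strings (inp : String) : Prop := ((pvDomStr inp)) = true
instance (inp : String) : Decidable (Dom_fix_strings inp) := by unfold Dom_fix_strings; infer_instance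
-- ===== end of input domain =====

-- B strips the padding segments via split-on-quote / rejoin (two library-split passes)
-- instead of A's per-character state machine; objective: alternative decomposition, same O(n) cost.

-- shared strip of one closed quoted segment (the identical `len>2 and ends are spaces` test in both Pythons)
def stripSeg (t : List Char) : List Char :=
  if 2 < t.length ∧ PySem.List.pyGet? t 0 = some ' ' ∧ PySem.List.pyGet? t (-1) = some ' '
  then PySem.List.slice t (some 1) (some (-1)) else t

-- ===== PORT A =====
-- one iteration of A's character loop: state (res, temp_string, inside)
def fixStep (q : Char) (st : List Char × List Char × Bool) (c : Char) :
    List Char × List Char × Bool :=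
  match st with
  | (res, temp, inside) =>
    if inside = false then (res ++ [c], temp, decide (c = q))
    else if c = q then (res ++ stripSeg temp ++ [q], ([] : List Char), false)
    else (res, temp ++ [c], true)

-- one full pass of A's loop for quote character q
def fixPass (q : Char) (cs : List Char) : List Char :=
  (cs.foldl (fixStep q) ([], [], false)).1

def fix_strings (inp : String) : String :=
  String.ofList (fixPass '\'' (fixPass '"' inp.toList))

-- ===== PORT B =====
-- port of Python's s.split(q) for a single-character separator
def splitChar (q : Char) : List Char → List (List Char)
  | [] => [[]]
  | c :: r =>
    let ps := splitChar q r
    if c = q then [] :: ps else (c :: ps.headI) :: ps.tail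

-- B's rejoin loop over parts[i], i = 1 .. last
def procB (q : Char) (last : Nat) : Nat → List (List Char) → List Char
  | _, [] => []
  | i, p :: rest =>
    q :: ((if i % 2 = 1 then (if i ≠ last then stripSeg p else []) else p)
           ++ procB q last (i + 1) rest)

-- B's helper _process(s, q)
def processB (q : Char) (cs : List Char) : List Char :=
  let parts := splitChar q cs
  parts.headI ++ procB q (parts.length - 1) 1 parts.tail

def fix_strings_alt (inp : String) : String :=
  String.ofList (processB '\'' (processB '"' inp.toList))

-- ===== PRECONDITION & SPEC =====
def Spec_fix_strings (inp : String) (out : String) : Prop := out = fix_strings_alt inp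
instance (inp : String) (out : String) : Decidable (Spec_fix_strings inp out) := by unfold Spec_fix_strings; infer_instance

-- ===== CLAIM (what is proved, stated in full; the proofs are below) =====
def Claim_equal_fix_strings : Prop := ∀ (inp : String), Dom_fix_strings inp → Spec_fix_strings inp (fix_strings inp)

-- ===== LEMMAS AND PROOFS =====

-- recursive characterisation of A's pass (outS: outside quotes, inS: inside with pending temp t)
mutual
def outS (q : Char) : List Char → List Char
  | [] => []
  | c :: r => if c = q then c :: inS q [] r else c :: outS q r
def inS (q : Char) (t : List Char) : List Char → List Char
  | [] => []
  | c :: r => if c = q then stripSeg t ++ c :: outS q r else inS q (t ++ [c]) r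
end

-- parity-form of B's rejoin loop (b = "current index is odd"; rest = [] ↔ current index is last)
def procB' (q : Char) : Bool → List (List Char) → List Char
  | _, [] => []
  | b, p :: rest =>
    q :: ((if b then (if rest = [] then [] else stripSeg p) else p) ++ procB' q (!b) rest)

theorem foldA (q : Char) (cs : List Char) :
    (∀ res, ((cs.foldl (fixStep q) (res, [], false))).1 = res ++ outS q cs)
    ∧ (∀ res t, ((cs.foldl (fixStep q) (res, t, true))).1 = res ++ inS q t cs) := by
  induction cs with
  | nil => simp [outS, inS]
  | cons c r ih =>
    constructor
    · intro res
      by_cases h : c = q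
      · simp [fixStep, h, outS, ih.2]
      · simp [fixStep, h, outS, ih.1]
    · intro res t
      by_cases h : c = q
      · simp [fixStep, h, inS, ih.1]
      · simp [fixStep, h, inS, ih.2]

theorem splitChar_ne_nil (q : Char) (cs : List Char) : splitChar q cs ≠ [] := by
  cases cs with
  | nil => simp [splitChar]
  | cons c r => simp [splitChar]; split <;> simp

theorem splitB (q : Char) (cs : List Char) :
    (outS q cs = (splitChar q cs).headI ++ procB' q true (splitChar q cs).tail)
    ∧ (∀ t, inS q t cs =
        if (splitChar q cs).tail = [] then []
        else stripSeg (t ++ (splitChar q cs).headI) ++ procB' q false (splitChar q cs).tail) := by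
  induction cs with
  | nil => simp [outS, inS, splitChar, procB']
  | cons c r ih =>
    obtain ⟨h', tail', heq⟩ : ∃ h' tail', splitChar q r = h' :: tail' := by
      cases hsp : splitChar q r with
      | nil => exact absurd hsp (splitChar_ne_nil q r)
      | cons a b => exact ⟨a, b, rfl⟩
    constructor
    · by_cases h : c = q
      · have hin := ih.2 []
        simp [outS, splitChar, h, heq, procB'] at hin ⊢
        rcases tail' with _ | ⟨p, rest⟩
        · simp_all [procB']
        · simp_all [procB']
      · have hout := ih.1
        simp [outS, splitChar, h, heq] at hout ⊢
        exact hout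
    · intro t
      by_cases h : c = q
      · have hout := ih.1
        simp [inS, splitChar, h, heq, procB'] at hout ⊢
        exact hout
      · have hin := ih.2 (t ++ [c])
        simp [inS, splitChar, h, heq] at hin ⊢
        simpa using hin

theorem procB_eq (q : Char) (last : Nat) :
    ∀ (l : List (List Char)) (i : Nat), i + l.length = last + 1 →
      procB q last i l = procB' q (decide (i % 2 = 1)) l := by
  intro l
  induction l with
  | nil => intro i _; simp [procB, procB']
  | cons p rest ih =>
    intro i hi
    simp only [List.length_cons] at hi
    have hlast : (i ≠ last) ↔ (rest ≠ []) := by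
      constructor
      · intro hne hr; subst hr; simp at hi; omega
      · intro hr hne; subst hne
        have : rest.length = 0 := by omega
        exact hr (List.eq_nil_of_length_eq_zero this)
    have hrec := ih (i + 1) (by omega)
    have hpar : (decide ((i + 1) % 2 = 1)) = !(decide (i % 2 = 1)) := by
      rcases Nat.mod_two_eq_zero_or_one i with h | h <;>
        simp [h, Nat.add_mod]
    simp only [procB, procB', hrec, hpar]
    congr 2
    by_cases hb : i % 2 = 1
    · simp only [hb, decide_true, if_true]
      by_cases hr : rest = []
      · simp [hr, hlast.not_right.mpr (by simp [hr])]
      · simp [hr, hlast.mpr hr]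
    · simp [hb]

theorem pass_eq (q : Char) (cs : List Char) : fixPass q cs = processB q cs := by
  have hA := (foldA q cs).1 []
  have hB := (splitB q cs).1
  obtain ⟨h', tail', heq⟩ : ∃ h' tail', splitChar q cs = h' :: tail' := by
    cases hsp : splitChar q cs with
    | nil => exact absurd hsp (splitChar_ne_nil q cs)
    | cons a b => exact ⟨a, b, rfl⟩
  have hproc : procB q ((splitChar q cs).length - 1) 1 (splitChar q cs).tail
      = procB' q true (splitChar q cs).tail := by
    have := procB_eq q ((splitChar q cs).length - 1) (splitChar q cs).tail 1
      (by simp [heq]; omega)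
    simpa using this
  simp only [fixPass, processB]
  rw [show ((cs.foldl (fixStep q) ([], [], false))).1 = [] ++ outS q cs from hA]
  simp only [List.nil_append, hB, hproc]

-- ===== VERDICT (by name: the statement is the Claim_ definition above) =====
theorem fix_strings_spec : Claim_equal_fix_strings := by
  intro inp _
  unfold Spec_fix_strings fix_strings fix_strings_alt
  rw [pass_eq, pass_eq]
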